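-- pv_equiv track=rewrite | github.com/ZivAndMegan/lstmCompetion | dataAnalyse.py | analyse_track_ulti
-- ===== SOURCE A (Python) =====
-- def analyse_track_ulti(result_track_data_humain):
--     result_traited_x = []
--     result_traited_y = []
--     num_1500_x = 0
--     num_1000_x = 0
--     num_500_x = 0
--     num_0_x = 0
--     num_1500_y = 0
--     num_1000_y = 0
--     num_500_y = 0
--     num_0_y = 0
--     for one_result in result_track_data_humain:
--         result_traited_x.append(one_result[0])
--         result_traited_y.append(one_result[1])
--         if one_result[0]>1500:
--             num_1500_x = num_1500_x+1
--         elif one_result[0]>1000: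
--             num_1000_x = num_1000_x+1
--         elif one_result[0]>500:
--             num_500_x = num_500_x+1
--         else:
--             num_0_x = num_0_x+1
--         if one_result[1]>1500:
--             num_1500_y = num_1500_y+1
--         elif one_result[1]>1000:
--             num_1000_y = num_1000_y+1
--         elif one_result[1]>500:
--             num_500_y = num_500_y+1
--         else:
--             num_0_y = num_0_y+1
--     return result_traited_x,result_traited_y,[num_1500_x,num_1000_x,num_500_x,num_0_x],[num_1500_y,num_1000_y,num_500_y,num_0_y]
-- ===== SOURCE B (Python) =====
-- def _count_le(s, t):
--     """Number of elements <= t in ascending-sorted list s, by binary search."""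
--     lo, hi = 0, len(s)
--     while lo < hi:
--         mid = (lo + hi) // 2
--         if s[mid] <= t:
--             lo = mid + 1
--         else:
--             hi = mid
--     return lo
--
--
-- def _bucket_counts(vals):
--     s = sorted(vals)
--     n = len(s)
--     c500 = _count_le(s, 500)
--     c1000 = _count_le(s, 1000)
--     c1500 = _count_le(s, 1500)
--     return [n - c1500, c1500 - c1000, c1000 - c500, c500]
--
--
-- def analyse_track_ulti(result_track_data_humain):
--     xs = [p[0] for p in result_track_data_humain]
--     ys = [p[1] for p in result_track_data_humain]
--     return xs, ys, _bucket_counts(xs), _bucket_counts(ys)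
-- ===== Notes on version B (the rewrite author's own statement) =====
-- stated objective: alternative
-- what changed: Instead of classifying each element with a four-way elif cascade in one accumulator loop, B sorts each coordinate list and locates the three threshold boundaries by hand-written binary search, deriving the four bucket counts as differences of cumulative counts.
import Mathlib
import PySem

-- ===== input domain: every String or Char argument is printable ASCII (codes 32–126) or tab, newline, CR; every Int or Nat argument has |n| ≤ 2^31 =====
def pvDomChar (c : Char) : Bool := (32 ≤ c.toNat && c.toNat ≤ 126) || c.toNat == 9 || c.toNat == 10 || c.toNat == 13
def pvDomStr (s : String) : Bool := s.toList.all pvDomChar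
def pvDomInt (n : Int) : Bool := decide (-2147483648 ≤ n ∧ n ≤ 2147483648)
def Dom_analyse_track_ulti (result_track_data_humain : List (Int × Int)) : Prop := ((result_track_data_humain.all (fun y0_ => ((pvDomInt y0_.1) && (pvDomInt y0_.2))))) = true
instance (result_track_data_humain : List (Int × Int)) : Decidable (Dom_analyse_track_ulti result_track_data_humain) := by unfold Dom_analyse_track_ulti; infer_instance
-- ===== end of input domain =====

-- B replaces A's single accumulator loop with two elif cascades by sorting each
-- coordinate list and locating the 500/1000/1500 boundaries with hand-written
-- binary search, deriving the buckets as differences of cumulative counts;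
-- objective: alternative (a genuinely different algorithm of similar cost).


-- ===== PORT A =====
-- A's for-loop over one_result, carrying the two result lists and the eight counters.
def pvALoop : List (Int × Int) → List Int → List Int → Int → Int → Int → Int → Int → Int → Int → Int → List Int × List Int × List Int × List Int
  | [], rx, ry, a15, a10, a5, a0, b15, b10, b5, b0 =>
      (rx, ry, [a15, a10, a5, a0], [b15, b10, b5, b0])
  | p :: rest, rx, ry, a15, a10, a5, a0, b15, b10, b5, b0 =>
      let rx := rx ++ [p.1]
      let ry := ry ++ [p.2]
      let (a15, a10, a5, a0) :=
        if p.1 > 1500 then (a15 + 1, a10, a5, a0)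
        else if p.1 > 1000 then (a15, a10 + 1, a5, a0)
        else if p.1 > 500 then (a15, a10, a5 + 1, a0)
        else (a15, a10, a5, a0 + 1)
      let (b15, b10, b5, b0) :=
        if p.2 > 1500 then (b15 + 1, b10, b5, b0)
        else if p.2 > 1000 then (b15, b10 + 1, b5, b0)
        else if p.2 > 500 then (b15, b10, b5 + 1, b0)
        else (b15, b10, b5, b0 + 1)
      pvALoop rest rx ry a15 a10 a5 a0 b15 b10 b5 b0

def analyse_track_ulti (result_track_data_humain : List (Int × Int)) : List Int × List Int × List Int × List Int :=
  pvALoop result_track_data_humain [] [] 0 0 0 0 0 0 0 0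

-- ===== PORT B =====
-- B's _count_le: binary-search while-loop on the sorted list (lo,hi always in range,
-- so List.getD with default 0 is exact for s[mid]).
def pvCountLe (s : List Int) (t : Int) (lo hi : Nat) : Nat :=
  if _h : lo < hi then
    let mid := (lo + hi) / 2
    if s.getD mid 0 ≤ t then pvCountLe s t (mid + 1) hi else pvCountLe s t lo mid
  else lo
termination_by hi - lo
decreasing_by all_goals omega

-- B's _bucket_counts: sort, three binary searches, buckets as differences.
def pvBucketCounts (vals : List Int) : List Int :=
  let s := PySem.List.sorted vals (fun x => x) false
  let n := s.length
  let c500 := pvCountLe s 500 0 n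
  let c1000 := pvCountLe s 1000 0 n
  let c1500 := pvCountLe s 1500 0 n
  [(n : Int) - (c1500 : Int), (c1500 : Int) - (c1000 : Int), (c1000 : Int) - (c500 : Int), (c500 : Int)]

def analyse_track_ulti_alt (result_track_data_humain : List (Int × Int)) : List Int × List Int × List Int × List Int :=
  let xs := result_track_data_humain.map (fun p => p.1)
  let ys := result_track_data_humain.map (fun p => p.2)
  (xs, ys, pvBucketCounts xs, pvBucketCounts ys)

-- ===== PRECONDITION & SPEC =====
def Spec_analyse_track_ulti (result_track_data_humain : List (Int × Int)) (out : List Int × List Int × List Int × List Int) : Prop := out = analyse_track_ulti_alt result_track_data_humain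
instance (result_track_data_humain : List (Int × Int)) (out : List Int × List Int × List Int × List Int) : Decidable (Spec_analyse_track_ulti result_track_data_humain out) := by unfold Spec_analyse_track_ulti; infer_instance

-- ===== CLAIM (what is proved, stated in full; the proofs are below) =====
def Claim_equal_analyse_track_ulti : Prop := ∀ (result_track_data_humain : List (Int × Int)), Dom_analyse_track_ulti result_track_data_humain → Spec_analyse_track_ulti result_track_data_humain (analyse_track_ulti result_track_data_humain)

-- ===== LEMMAS AND PROOFS =====

-- the four bucket counts of a list of values, and the cumulative count ≤ t
def pvN0 (l : List Int) : Int := l.countP (fun v => decide (1500 < v))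
def pvN1 (l : List Int) : Int := l.countP (fun v => decide (1000 < v ∧ v ≤ 1500))
def pvN2 (l : List Int) : Int := l.countP (fun v => decide (500 < v ∧ v ≤ 1000))
def pvN3 (l : List Int) : Int := l.countP (fun v => decide (v ≤ 500))
def pvCle (l : List Int) (t : Int) : Nat := l.countP (fun v => decide (v ≤ t))

-- on a ≤-sorted list, the elements ≤ t are exactly the first (pvCle s t) positions
lemma pv_sorted_le_iff (s : List Int) (hs : s.Pairwise (· ≤ ·)) (t : Int) :
    ∀ i, i < s.length → (s.getD i 0 ≤ t ↔ i < pvCle s t) := by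
  induction s with
  | nil => intro i h; simp at h
  | cons a tail ih =>
    rcases List.pairwise_cons.mp hs with ⟨ha, htail⟩
    intro i hi
    cases i with
    | zero =>
      rw [List.getD_cons_zero]
      unfold pvCle
      rw [List.countP_cons]
      constructor
      · intro h; simp [h]
      · intro h
        by_contra hc
        have h0 : List.countP (fun v => decide (v ≤ t)) tail = 0 :=
          List.countP_eq_zero.mpr (fun v hv => by have := ha v hv; simp; omega)
        rw [h0] at h; simp [hc] at h
    | succ j =>
      have hj : j < tail.length := by simpa using hi
      have hrec := ih htail j hj
      rw [List.getD_cons_succ]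
      unfold pvCle at hrec ⊢
      rw [List.countP_cons]
      by_cases hat : a ≤ t
      · simp only [hat, decide_true, if_pos]
        rw [hrec]; omega
      · have h0 : List.countP (fun v => decide (v ≤ t)) tail = 0 :=
          List.countP_eq_zero.mpr (fun v hv => by have := ha v hv; simp; omega)
        have hmem : tail.getD j 0 ∈ tail := by
          rw [List.getD_eq_getElem tail 0 hj]; exact List.getElem_mem hj
        have hav := ha _ hmem
        have hnot : ¬ tail.getD j 0 ≤ t := by omega
        rw [h0]
        have hif : (if (decide (a ≤ t)) = true then 1 else 0) = 0 := by simp [hat]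
        rw [hif]
        exact iff_of_false hnot (by omega)

lemma pvCountLe_go (s : List Int) (t : Int) (hs : s.Pairwise (· ≤ ·)) :
    ∀ (fuel lo hi : Nat), hi - lo ≤ fuel → lo ≤ pvCle s t → pvCle s t ≤ hi → hi ≤ s.length →
      pvCountLe s t lo hi = pvCle s t := by
  intro fuel
  induction fuel with
  | zero =>
    intro lo hi hf h1 h2 h3
    rw [pvCountLe]
    have hnlt : ¬ lo < hi := by omega
    rw [dif_neg hnlt]
    omega
  | succ n ih =>
    intro lo hi hf h1 h2 h3
    rw [pvCountLe]
    by_cases hlt : lo < hi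
    · simp only [dif_pos hlt]
      have hm : (lo + hi) / 2 < s.length := by omega
      have hiff := pv_sorted_le_iff s hs t ((lo + hi) / 2) hm
      by_cases hle : s.getD ((lo + hi) / 2) 0 ≤ t
      · have := hiff.mp hle
        simp only [if_pos hle]
        exact ih ((lo + hi) / 2 + 1) hi (by omega) (by omega) h2 h3
      · have : ¬ (lo + hi) / 2 < pvCle s t := fun hc => hle (hiff.mpr hc)
        simp only [if_neg hle]
        exact ih lo ((lo + hi) / 2) (by omega) h1 (by omega) (by omega)
    · rw [dif_neg hlt]
      omega

lemma pvCountLe_spec (s : List Int) (t : Int) (hs : s.Pairwise (· ≤ ·)) :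
    pvCountLe s t 0 s.length = pvCle s t :=
  pvCountLe_go s t hs s.length 0 s.length (by omega) (Nat.zero_le _)
    List.countP_le_length le_rfl

-- cumulative-count arithmetic over any list
lemma pv_cum (l : List Int) :
    (l.length : Int) = (pvCle l 1500 : Int) + pvN0 l ∧
    (pvCle l 1500 : Int) = (pvCle l 1000 : Int) + pvN1 l ∧
    (pvCle l 1000 : Int) = (pvCle l 500 : Int) + pvN2 l ∧
    (pvCle l 500 : Int) = pvN3 l := by
  induction l with
  | nil => simp [pvCle, pvN0, pvN1, pvN2, pvN3]
  | cons a tail ih =>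
    obtain ⟨e1, e2, e3, e4⟩ := ih
    simp only [pvCle, pvN0, pvN1, pvN2, pvN3] at e1 e2 e3 e4
    simp only [pvCle, pvN0, pvN1, pvN2, pvN3, List.countP_cons, List.length_cons,
      decide_eq_true_eq]
    refine ⟨?_, ?_, ?_, ?_⟩ <;> first
      | (split_ifs <;> push_cast at * <;> omega)
      | (push_cast at *; omega)
      | trivial

lemma pvBucketCounts_spec (l : List Int) :
    pvBucketCounts l = [pvN0 l, pvN1 l, pvN2 l, pvN3 l] := by
  have hperm : (PySem.List.sorted l (fun x => x) false).Perm l :=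
    PySem.List.sorted_perm l (fun x => x) false
  have hpw : (PySem.List.sorted l (fun x => x) false).Pairwise (· ≤ ·) := by
    simpa using PySem.List.sorted_pairwise l (fun x => x)
  set s := PySem.List.sorted l (fun x => x) false with hsdef
  have hlen : s.length = l.length := hperm.length_eq
  have hc : ∀ t : Int, pvCountLe s t 0 s.length = pvCle l t := fun t =>
    (pvCountLe_spec s t hpw).trans (hperm.countP_eq _)
  obtain ⟨e1, e2, e3, e4⟩ := pv_cum l
  simp only [pvBucketCounts, ← hsdef]
  rw [hc, hc, hc, hlen]
  simp only [List.cons.injEq, and_true]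
  exact ⟨by omega, by omega, by omega, by omega⟩

lemma pvALoop_spec (l : List (Int × Int)) : ∀ (rx ry : List Int) (a15 a10 a5 a0 b15 b10 b5 b0 : Int),
    pvALoop l rx ry a15 a10 a5 a0 b15 b10 b5 b0
      = (rx ++ l.map (fun p => p.1), ry ++ l.map (fun p => p.2),
         [a15 + pvN0 (l.map (fun p => p.1)), a10 + pvN1 (l.map (fun p => p.1)),
          a5 + pvN2 (l.map (fun p => p.1)), a0 + pvN3 (l.map (fun p => p.1))],
         [b15 + pvN0 (l.map (fun p => p.2)), b10 + pvN1 (l.map (fun p => p.2)),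
          b5 + pvN2 (l.map (fun p => p.2)), b0 + pvN3 (l.map (fun p => p.2))]) := by
  induction l with
  | nil => simp [pvALoop, pvN0, pvN1, pvN2, pvN3]
  | cons p t ih =>
    intro rx ry a15 a10 a5 a0 b15 b10 b5 b0
    simp only [pvALoop]
    by_cases hx15 : p.1 > 1500 <;> by_cases hx10 : p.1 > 1000 <;> by_cases hx5 : p.1 > 500 <;>
      by_cases hy15 : p.2 > 1500 <;> by_cases hy10 : p.2 > 1000 <;> by_cases hy5 : p.2 > 500
    all_goals try omega
    all_goals
      simp only [hx15, hx10, hx5, hy15, hy10, hy5]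
    all_goals
      rw [ih]
    all_goals
      simp [pvN0, pvN1, pvN2, pvN3, List.countP_cons, hx15, hx10, hx5, hy15, hy10, hy5]
    all_goals
      omega

-- ===== VERDICT (by name: the statement is the Claim_ definition above) =====
theorem analyse_track_ulti_spec : Claim_equal_analyse_track_ulti := by
  intro l _
  show analyse_track_ulti l = analyse_track_ulti_alt l
  simp [analyse_track_ulti, analyse_track_ulti_alt, pvALoop_spec, pvBucketCounts_spec]
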